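-- pv_equiv track=rewrite | github.com/renliang/coin | scanner/new_coin.py | is_leverage_like_base
-- ===== SOURCE A (Python) =====
-- _LEVERAGE_SUFFIXES = ("UP", "DOWN", "BULL", "BEAR")
--
-- _LEVERAGE_MARKERS = ("3L", "3S", "2L", "2S", "4L", "4S", "5L", "5S")
--
-- def is_leverage_like_base(base: str) -> bool:
--     u = base.upper()
--     for suf in _LEVERAGE_SUFFIXES:
--         if u.endswith(suf) and len(u) > len(suf):
--             return True
--     for m in _LEVERAGE_MARKERS:
--         if m in u:
--             return True
--     return False
-- ===== SOURCE B (Python) =====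
-- def is_leverage_like_base(base: str) -> bool:
--     u = base.upper()
--     n = len(u)
--     if n > 2 and u[n - 2:] == "UP":
--         return True
--     if n > 4 and u[n - 4:] in ("DOWN", "BULL", "BEAR"):
--         return True
--     return any(a in "2345" and b in "LS" for a, b in zip(u, u[1:]))
-- ===== Notes on version B (the rewrite author's own statement) =====
-- stated objective: alternative
-- what changed: B replaces the eight independent substring searches for leverage markers with a single adjacent-pair scan (a digit in 2345 followed by L or S) and groups the four suffix checks by length into two tail-slice comparisons.
import Mathlib
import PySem

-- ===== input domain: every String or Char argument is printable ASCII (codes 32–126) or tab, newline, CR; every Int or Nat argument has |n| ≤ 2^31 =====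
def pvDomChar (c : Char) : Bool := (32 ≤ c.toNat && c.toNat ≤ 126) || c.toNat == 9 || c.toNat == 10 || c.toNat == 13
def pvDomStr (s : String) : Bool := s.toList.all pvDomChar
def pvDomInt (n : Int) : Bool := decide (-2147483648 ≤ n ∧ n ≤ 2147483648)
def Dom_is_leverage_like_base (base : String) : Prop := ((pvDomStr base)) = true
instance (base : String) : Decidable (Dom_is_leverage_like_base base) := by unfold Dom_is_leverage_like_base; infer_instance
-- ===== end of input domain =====

-- B replaces the eight substring searches by one adjacent-pair scan (digit 2-5 followed
-- by L/S) and groups the suffix checks by length; objective: alternative.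

-- ===== PORT A =====
def pvLeverageSuffixes : List String := ["UP", "DOWN", "BULL", "BEAR"]
def pvLeverageMarkers : List String := ["3L", "3S", "2L", "2S", "4L", "4S", "5L", "5S"]

def is_leverage_like_base (base : String) : Bool :=
  let u := PySem.Str.upper base
  if pvLeverageSuffixes.any (fun suf =>
      PySem.Str.endswith u suf && decide (PySem.Str.len suf < PySem.Str.len u)) then
    true
  else if pvLeverageMarkers.any (fun m => PySem.Str.isIn m u) then
    true
  else
    false

-- ===== PORT B =====
def is_leverage_like_base_alt (base : String) : Bool :=
  let u := (PySem.Str.upper base).toList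
  let n : Int := u.length
  if decide (2 < n) && (PySem.List.slice u (some (n - 2)) none == "UP".toList) then
    true
  else if decide (4 < n) &&
      ([("DOWN".toList), ("BULL".toList), ("BEAR".toList)].contains
        (PySem.List.slice u (some (n - 4)) none)) then
    true
  else
    (u.zip u.tail).any (fun p =>
      (['2', '3', '4', '5'].contains p.1) && (['L', 'S'].contains p.2))

-- ===== PRECONDITION & SPEC =====
def Spec_is_leverage_like_base (base : String) (out : Bool) : Prop := out = is_leverage_like_base_alt base
instance (base : String) (out : Bool) : Decidable (Spec_is_leverage_like_base base out) := by unfold Spec_is_leverage_like_base; infer_instance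

-- ===== CLAIM (what is proved, stated in full; the proofs are below) =====
def Claim_equal_is_leverage_like_base : Prop := ∀ (base : String), Dom_is_leverage_like_base base → Spec_is_leverage_like_base base (is_leverage_like_base base)

-- ===== LEMMAS AND PROOFS =====

-- a two-character list is an infix iff the pair occurs adjacently
theorem pvPairInfix (a b : Char) (l : List Char) :
    ([a, b] <:+: l) ↔ (a, b) ∈ l.zip l.tail := by
  induction l with
  | nil => simp
  | cons c l ih =>
    rw [List.infix_cons_iff]
    cases l with
    | nil =>
      simp only [List.tail_cons, List.zip_nil_right, List.not_mem_nil]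
      constructor
      · rintro (h | h)
        · exact absurd h.length_le (by simp)
        · simpa using h.length_le
      · exact fun h => h.elim
    | cons d l' =>
      constructor
      · rintro (h | h)
        · rcases List.cons_prefix_cons.mp h with ⟨rfl, h2⟩
          rcases List.cons_prefix_cons.mp h2 with ⟨rfl, _⟩
          simp
        · have h' := ih.mp h
          simp only [List.tail_cons, List.zip_cons_cons, List.mem_cons] at h' ⊢
          tauto
      · intro h
        simp only [List.tail_cons, List.zip_cons_cons, List.mem_cons] at h
        rcases h with h | h
        · left
          rcases Prod.mk.injEq .. ▸ h with ⟨rfl, rfl⟩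
          exact List.cons_prefix_cons.mpr ⟨rfl, List.cons_prefix_cons.mpr ⟨rfl, List.nil_prefix⟩⟩
        · right
          apply ih.mpr
          simp only [List.tail_cons]
          tauto

-- the eight substring searches equal the adjacent-pair scan
theorem pvMarkerEq (l : List Char) :
    (pvLeverageMarkers.any (fun m => PySem.Chars.isIn m.toList l)) =
    ((l.zip l.tail).any (fun p =>
      (['2', '3', '4', '5'].contains p.1) && (['L', 'S'].contains p.2))) := by
  rw [Bool.eq_iff_iff]
  simp only [List.any_eq_true, PySem.Chars.isIn_iff_infix, pvLeverageMarkers]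
  constructor
  · rintro ⟨m, hm, hinf⟩
    simp only [List.mem_cons, List.not_mem_nil, or_false] at hm
    rcases hm with rfl | rfl | rfl | rfl | rfl | rfl | rfl | rfl <;>
      exact ⟨_, (pvPairInfix _ _ l).mp hinf, by decide⟩
  · rintro ⟨⟨a, b⟩, hp, hab⟩
    simp only [List.contains_eq_mem, List.mem_cons, List.not_mem_nil, or_false,
      decide_eq_true_eq, Bool.and_eq_true] at hab
    rcases hab with ⟨ha, hb⟩
    have hinf : [a, b] <:+: l := (pvPairInfix a b l).mpr hp
    rcases ha with rfl | rfl | rfl | rfl <;> rcases hb with rfl | rfl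
    · exact ⟨"2L", by simp, hinf⟩
    · exact ⟨"2S", by simp, hinf⟩
    · exact ⟨"3L", by simp, hinf⟩
    · exact ⟨"3S", by simp, hinf⟩
    · exact ⟨"4L", by simp, hinf⟩
    · exact ⟨"4S", by simp, hinf⟩
    · exact ⟨"5L", by simp, hinf⟩
    · exact ⟨"5S", by simp, hinf⟩

-- the four guarded endswith checks equal the two grouped slice comparisons
theorem pvSufAll (l : List Char) :
    (pvLeverageSuffixes.any (fun suf =>
      PySem.Chars.endswith l suf.toList &&
        decide ((suf.toList.length : Int) < (l.length : Int)))) =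
    ((decide (2 < (l.length : Int)) &&
        (PySem.List.slice l (some ((l.length : Int) - 2)) none == "UP".toList)) ||
     (decide (4 < (l.length : Int)) &&
        ([("DOWN".toList), ("BULL".toList), ("BEAR".toList)].contains
          (PySem.List.slice l (some ((l.length : Int) - 4)) none)))) := by
  rw [Bool.eq_iff_iff]
  simp only [pvLeverageSuffixes, List.any_cons, List.any_nil, Bool.or_eq_true,
    Bool.and_eq_true, decide_eq_true_eq, PySem.Chars.endswith_iff,
    List.suffix_iff_eq_drop, beq_iff_eq, List.contains_eq_mem, List.mem_cons,
    List.not_mem_nil, or_false, Bool.false_eq_true,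
    show "UP".toList = ['U', 'P'] from rfl, show "DOWN".toList = ['D', 'O', 'W', 'N'] from rfl,
    show "BULL".toList = ['B', 'U', 'L', 'L'] from rfl, show "BEAR".toList = ['B', 'E', 'A', 'R'] from rfl,
    List.length_cons, List.length_nil]
  by_cases h2 : (2 : Int) < (l.length : Int)
  · have hs2 : PySem.List.slice l (some ((l.length : Int) - 2)) none = l.drop (l.length - 2) := by
      rw [PySem.List.slice_from _ (by omega)]
      congr 1
      omega
    by_cases h4 : (4 : Int) < (l.length : Int)
    · have hs4 : PySem.List.slice l (some ((l.length : Int) - 4)) none = l.drop (l.length - 4) := by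
        rw [PySem.List.slice_from _ (by omega)]
        congr 1
        omega
      rw [hs2, hs4]
      norm_num [h2, h4]
      simp [eq_comm]
    · rw [hs2]
      norm_num [h2, h4]
      simp [eq_comm]
  · have h4 : ¬ (4 : Int) < (l.length : Int) := by omega
    norm_num [h2, h4]

-- the whole comparison, on the uppercased character list
theorem pvMain (l : List Char) :
    (if pvLeverageSuffixes.any (fun suf =>
        PySem.Chars.endswith l suf.toList &&
          decide ((suf.toList.length : Int) < (l.length : Int))) then true
     else if pvLeverageMarkers.any (fun m => PySem.Chars.isIn m.toList l) then true
     else false)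
    =
    (if decide (2 < (l.length : Int)) &&
        (PySem.List.slice l (some ((l.length : Int) - 2)) none == "UP".toList) then true
     else if decide (4 < (l.length : Int)) &&
        ([("DOWN".toList), ("BULL".toList), ("BEAR".toList)].contains
          (PySem.List.slice l (some ((l.length : Int) - 4)) none)) then true
     else (l.zip l.tail).any (fun p =>
        (['2', '3', '4', '5'].contains p.1) && (['L', 'S'].contains p.2))) := by
  have hb : ∀ a b c : Bool, (if a then true else if b then true else c) = (a || (b || c)) := by
    decide
  rw [hb, hb, pvMarkerEq, pvSufAll, Bool.or_false, Bool.or_assoc]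

-- ===== VERDICT (by name: the statement is the Claim_ definition above) =====
theorem is_leverage_like_base_spec : Claim_equal_is_leverage_like_base := by
  intro base _
  unfold Spec_is_leverage_like_base is_leverage_like_base is_leverage_like_base_alt
  simp only [PySem.Str.endswith_eq, PySem.Str.isIn_eq, PySem.Str.len_eq]
  exact pvMain ((PySem.Str.upper base).toList)
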